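-- pv_equiv track=rewrite | github.com/hossainmd-uc/tip-103 | Unit1PS1.py | tiggerfy2
-- ===== SOURCE A (Python) =====
-- def tiggerfy2(word):
--     i = 0
--     final = []
--     two_match = ["gg", "er"]
--
--     while i < len(word):
--         one_letter = word[i].lower()
--         two_letter = word[i : i + 2].lower()
--
--         if one_letter in ["t", "i"]:
--             i += 1
--         elif two_letter in two_match:
--             i += 2
--         else:
--             final.append(word[i])
--             i += 1
--
--     return "".join(final)
-- ===== SOURCE B (Python) =====
-- import re
--
-- def tiggerfy2(word):
--     # One case-insensitive regex substitution: delete every single t/i and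
--     # every gg/er pair in one non-overlapping left-to-right scan.
--     return re.sub(r'[ti]|gg|er', '', word, flags=re.IGNORECASE)
-- ===== Notes on version B (the rewrite author's own statement) =====
-- stated objective: idiomatic
-- what changed: Replaced the manual index-walking while loop with a single case-insensitive regex substitution deleting the pattern [ti]|gg|er; the regex engine's non-overlapping left-to-right scan replaces the hand-written index arithmetic, slicing and list append/join.
import Mathlib
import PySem

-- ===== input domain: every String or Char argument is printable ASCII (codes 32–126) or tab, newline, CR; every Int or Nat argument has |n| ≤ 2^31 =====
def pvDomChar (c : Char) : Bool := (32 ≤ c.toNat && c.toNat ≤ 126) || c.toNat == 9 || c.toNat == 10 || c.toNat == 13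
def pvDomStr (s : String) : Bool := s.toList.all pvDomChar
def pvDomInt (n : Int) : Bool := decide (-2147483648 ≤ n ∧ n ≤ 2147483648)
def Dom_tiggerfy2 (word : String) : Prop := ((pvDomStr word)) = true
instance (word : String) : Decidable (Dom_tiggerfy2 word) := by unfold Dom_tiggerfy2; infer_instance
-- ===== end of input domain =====

-- B replaces A's index-walking loop with one case-insensitive regex substitution (idiomatic).

-- ===== PORT A =====
-- the while loop: recursion on the index i, same state (i, final)
def tiggerfy2Loop (w : List Char) (i : Nat) (final : List Char) : List Char :=
  if h : i < w.length then
    let one := PySem.Chars.lowerChar w[i]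
    let two := PySem.Chars.lower (PySem.List.slice w (some (i : Int)) (some ((i : Int) + 2)))
    if one = 't' ∨ one = 'i' then
      tiggerfy2Loop w (i + 1) final
    else if two = ['g', 'g'] ∨ two = ['e', 'r'] then
      tiggerfy2Loop w (i + 2) final
    else
      tiggerfy2Loop w (i + 1) (final ++ [w[i]])
  else final
termination_by w.length - i

def tiggerfy2 (word : String) : String :=
  String.ofList (tiggerfy2Loop word.toList 0 [])

-- ===== PORT B =====
-- hand port of re.sub(r'[ti]|gg|er', '', word, flags=re.IGNORECASE): the regex
-- engine's non-overlapping left-to-right scan, alternatives tried in order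
-- ([ti] first, then gg, then er); exact for this fixed pattern on ASCII input.
def tiggerfy2AltGo : List Char → List Char
  | [] => []
  | [c] =>
    if PySem.Chars.lowerChar c = 't' ∨ PySem.Chars.lowerChar c = 'i' then [] else [c]
  | c :: d :: cs =>
    if PySem.Chars.lowerChar c = 't' ∨ PySem.Chars.lowerChar c = 'i' then
      tiggerfy2AltGo (d :: cs)
    else if (PySem.Chars.lowerChar c = 'g' ∧ PySem.Chars.lowerChar d = 'g') ∨
            (PySem.Chars.lowerChar c = 'e' ∧ PySem.Chars.lowerChar d = 'r') then
      tiggerfy2AltGo cs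
    else
      c :: tiggerfy2AltGo (d :: cs)

def tiggerfy2_alt (word : String) : String :=
  String.ofList (tiggerfy2AltGo word.toList)

-- ===== PRECONDITION & SPEC =====
def Spec_tiggerfy2 (word : String) (out : String) : Prop := out = tiggerfy2_alt word
instance (word : String) (out : String) : Decidable (Spec_tiggerfy2 word out) := by unfold Spec_tiggerfy2; infer_instance

-- ===== CLAIM (what is proved, stated in full; the proofs are below) =====
def Claim_equal_tiggerfy2 : Prop := ∀ (word : String), Dom_tiggerfy2 word → Spec_tiggerfy2 word (tiggerfy2 word)

-- ===== LEMMAS AND PROOFS =====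

theorem tiggerfy2_loop_eq (w : List Char) :
    ∀ k i final, w.length - i ≤ k →
      tiggerfy2Loop w i final = final ++ tiggerfy2AltGo (w.drop i) := by
  intro k
  induction k with
  | zero =>
    intro i final h
    have hge : w.length ≤ i := by omega
    rw [tiggerfy2Loop]
    simp [Nat.not_lt.mpr hge, List.drop_eq_nil_of_le hge, tiggerfy2AltGo]
  | succ k ih =>
    intro i final h
    by_cases hi : i < w.length
    · have hdrop : w.drop i = w[i] :: w.drop (i + 1) := List.drop_eq_getElem_cons hi
      have hsl : PySem.List.slice w (some (i : Int)) (some ((i : Int) + 2)) = (w.drop i).take 2 := by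
        rw [PySem.List.slice_toNat]
        · have h2 : ((i : Int) + 2).toNat = i + 2 := by omega
          have h1 : ((i : Int)).toNat = i := by omega
          rw [h1, h2]
          congr 1
          omega
        · positivity
        · positivity
      rw [tiggerfy2Loop]
      simp only [hi, dif_pos]
      by_cases h1 : PySem.Chars.lowerChar w[i] = 't' ∨ PySem.Chars.lowerChar w[i] = 'i'
      · rw [if_pos h1, ih (i + 1) final (by omega), hdrop]
        cases hd : w.drop (i + 1) with
        | nil => simp [tiggerfy2AltGo, h1]
        | cons d cs => simp [tiggerfy2AltGo, h1]
      · rw [if_neg h1]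
        cases hd : w.drop (i + 1) with
        | nil =>
          have htwo : PySem.Chars.lower (PySem.List.slice w (some (i : Int)) (some ((i : Int) + 2)))
              = [PySem.Chars.lowerChar w[i]] := by
            rw [hsl, hdrop, hd]
            rfl
          rw [htwo]
          have h2 : ¬ ([PySem.Chars.lowerChar w[i]] = ['g', 'g'] ∨
              [PySem.Chars.lowerChar w[i]] = ['e', 'r']) := by
            simp
          rw [if_neg h2, ih (i + 1) (final ++ [w[i]]) (by omega), hd, hdrop, hd]
          simp [tiggerfy2AltGo, h1]
        | cons d cs =>
          have htwo : PySem.Chars.lower (PySem.List.slice w (some (i : Int)) (some ((i : Int) + 2)))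
              = [PySem.Chars.lowerChar w[i], PySem.Chars.lowerChar d] := by
            rw [hsl, hdrop, hd]
            rfl
          have hd2 : w.drop (i + 2) = cs := by
            have h' := congrArg (List.drop 1) hd
            rw [List.drop_drop] at h'
            simpa [show 1 + (i + 1) = i + 2 from by omega] using h'
          rw [htwo]
          by_cases h2 : [PySem.Chars.lowerChar w[i], PySem.Chars.lowerChar d] = ['g', 'g'] ∨
              [PySem.Chars.lowerChar w[i], PySem.Chars.lowerChar d] = ['e', 'r']
          · rw [if_pos h2, ih (i + 2) final (by omega), hd2, hdrop, hd]
            have h2' : (PySem.Chars.lowerChar w[i] = 'g' ∧ PySem.Chars.lowerChar d = 'g') ∨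
                (PySem.Chars.lowerChar w[i] = 'e' ∧ PySem.Chars.lowerChar d = 'r') := by
              rcases h2 with h2 | h2 <;> simp_all
            simp [tiggerfy2AltGo, h1, h2']
          · rw [if_neg h2, ih (i + 1) (final ++ [w[i]]) (by omega), hdrop, hd]
            have h2' : ¬ ((PySem.Chars.lowerChar w[i] = 'g' ∧ PySem.Chars.lowerChar d = 'g') ∨
                (PySem.Chars.lowerChar w[i] = 'e' ∧ PySem.Chars.lowerChar d = 'r')) := by
              intro hc
              apply h2
              rcases hc with hc | hc <;> simp_all
            simp [tiggerfy2AltGo, h1, h2']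
    · have hge : w.length ≤ i := by omega
      rw [tiggerfy2Loop]
      simp [Nat.not_lt.mpr hge, List.drop_eq_nil_of_le hge, tiggerfy2AltGo]

-- ===== VERDICT (by name: the statement is the Claim_ definition above) =====
theorem tiggerfy2_spec : Claim_equal_tiggerfy2 := by
  intro word _
  unfold Spec_tiggerfy2 tiggerfy2 tiggerfy2_alt
  rw [tiggerfy2_loop_eq word.toList word.toList.length 0 [] (by omega)]
  simp
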